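-- pv_equiv track=rewrite | github.com/davidoterof/adventofcode | 2025/8/8.py | merge_circuits
-- ===== SOURCE A (Python) =====
-- def merge_circuits(circuits):
--     merged = []
--     while circuits:
--         current = circuits.pop(0)
--         merged_flag = False
--         for i in range(len(merged)):
--             if not current.isdisjoint(merged[i]):
--                 merged[i] = merged[i].union(current)
--                 merged_flag = True
--                 break
--         if not merged_flag:
--             merged.append(current)
--     return merged
-- ===== SOURCE B (Python) =====
-- def merge_circuits(circuits):
--     # element -> smallest index of a merged group containing it; one pass, O(total elements)
--     merged = []
--     loc = {}
--     for cur in circuits: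
--         hits = [loc[e] for e in cur if e in loc]
--         if hits:
--             j = min(hits)
--             merged[j] = merged[j] | cur
--         else:
--             j = len(merged)
--             merged.append(cur)
--         for e in cur:
--             if e not in loc or loc[e] > j:
--                 loc[e] = j
--     return merged
-- ===== Notes on version B (the rewrite author's own statement) =====
-- stated objective: alternative
-- what changed: B replaces A's inner scan of all merged groups (a set-disjointness test per group) by a hash map from element to the index of the first merged group containing it, so each circuit is placed by looking up its elements once and taking the minimum index; measured cost is similar (A's per-group disjointness tests run in C).
import Mathlib
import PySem

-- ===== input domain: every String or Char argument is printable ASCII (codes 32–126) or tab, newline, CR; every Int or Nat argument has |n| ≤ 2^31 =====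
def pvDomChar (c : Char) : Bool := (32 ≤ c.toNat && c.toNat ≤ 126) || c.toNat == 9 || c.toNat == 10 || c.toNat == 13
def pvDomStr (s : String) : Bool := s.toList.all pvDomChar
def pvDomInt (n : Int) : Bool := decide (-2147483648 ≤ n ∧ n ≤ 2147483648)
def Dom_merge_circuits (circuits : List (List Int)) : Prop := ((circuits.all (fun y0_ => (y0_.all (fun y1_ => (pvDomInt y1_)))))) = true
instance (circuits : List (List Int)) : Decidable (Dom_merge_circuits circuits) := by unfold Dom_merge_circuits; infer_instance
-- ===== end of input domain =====

-- B places each circuit by looking up its elements in an element→first-group-index map and taking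
-- the minimum, instead of A's scan of the merged groups with a disjointness test per group (a
-- different algorithm of similar measured cost). Equivalence is about the RETURN value only:
-- Python A empties its argument list via pop(0); B does not mutate it.

-- ===== PORT A =====
-- for i in range(len(merged)): if not current.isdisjoint(merged[i]): merged[i] = merged[i].union(current); break
def scanMergeA (current : List Int) : List (List Int) → Option (List (List Int))
  | [] => none
  | g :: rest =>
      if !PySem.Set.isdisjoint current g then some (PySem.Set.union g current :: rest)
      else (scanMergeA current rest).map (g :: ·)

-- while circuits: current = circuits.pop(0); … ; if not merged_flag: merged.append(current)
def loopA : List (List Int) → List (List Int) → List (List Int)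
  | [], merged => merged
  | current :: rest, merged =>
      match scanMergeA current merged with
      | some m => loopA rest m
      | none => loopA rest (merged ++ [current])

def merge_circuits (circuits : List (List Int)) : List (List Int) := loopA circuits []

-- ===== PORT B =====
-- hits = [loc[e] for e in cur if e in loc]
def hitsB (loc : PySem.Dict Int Int) (cur : List Int) : List Int :=
  cur.filterMap (fun e => loc.get? e)

-- for e in cur: if e not in loc or loc[e] > j: loc[e] = j
def updLocB (loc : PySem.Dict Int Int) (cur : List Int) (j : Int) : PySem.Dict Int Int :=
  cur.foldl (fun d e =>
    match d.get? e with
    | none => d.insert e j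
    | some v => if v > j then d.insert e j else d) loc

def loopB : List (List Int) → List (List Int) → PySem.Dict Int Int → List (List Int)
  | [], merged, _ => merged
  | cur :: rest, merged, loc =>
      match PySem.List.min? (hitsB loc cur) (fun x => x) with
      | some j =>
          loopB rest
            (PySem.List.pySetD merged j (PySem.Set.union (PySem.List.pyGetD merged j []) cur))
            (updLocB loc cur j)
      | none => loopB rest (merged ++ [cur]) (updLocB loc cur (merged.length : Int))

def merge_circuits_alt (circuits : List (List Int)) : List (List Int) :=
  loopB circuits [] PySem.Dict.empty

-- ===== PRECONDITION & SPEC =====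
def Spec_merge_circuits (circuits : List (List Int)) (out : List (List Int)) : Prop := out = merge_circuits_alt circuits
instance (circuits : List (List Int)) (out : List (List Int)) : Decidable (Spec_merge_circuits circuits out) := by unfold Spec_merge_circuits; infer_instance

-- ===== CLAIM (what is proved, stated in full; the proofs are below) =====
def Claim_equal_merge_circuits : Prop := ∀ (circuits : List (List Int)), Dom_merge_circuits circuits → Spec_merge_circuits circuits (merge_circuits circuits)

-- ===== LEMMAS AND PROOFS =====

-- loc maps each element to the index of the FIRST merged group containing it (and nothing else)
def InvLoc (loc : PySem.Dict Int Int) (merged : List (List Int)) : Prop :=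
  ∀ e : Int, loc.get? e = (merged.findIdx? (fun g => decide (e ∈ g))).map (fun n : Nat => (n : Int))

lemma updLocB_get? (c : List Int) (loc : PySem.Dict Int Int) (j e : Int) :
    (updLocB loc c j).get? e =
      if e ∈ c then
        some (match loc.get? e with | none => j | some v => min v j)
      else loc.get? e := by
  induction c generalizing loc with
  | nil => simp [updLocB]
  | cons x xs ih =>
      simp only [updLocB, List.foldl_cons] at *
      have step : ∀ d : PySem.Dict Int Int,
          (match d.get? x with
            | none => d.insert x j
            | some v => if v > j then d.insert x j else d).get? e =
          if e = x then some (match d.get? x with | none => j | some v => min v j)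
          else d.get? e := by
        intro d
        cases hv : d.get? x with
        | none => simp [PySem.Dict.get?_insert]
        | some v =>
            by_cases hvj : v > j
            · simp only [hvj]
              by_cases he : e = x
              · subst he; simp [min_def, not_le.mpr hvj]
              · simp [PySem.Dict.get?_insert, he]
            · simp only [hvj, if_false]
              by_cases he : e = x
              · subst he; simp [hv, not_lt.mp hvj]
              · simp [he]
      rw [ih, step]
      by_cases he : e = x
      · subst he
        by_cases hmem : e ∈ xs
        · cases hv : loc.get? e with
          | none => simp [hmem]
          | some v => simp [hmem]
        · simp [hmem]
      · simp [he]

lemma scanMergeA_none (c : List Int) (merged : List (List Int))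
    (h : merged.findIdx? (fun g => !PySem.Set.isdisjoint c g) = none) :
    scanMergeA c merged = none := by
  induction merged with
  | nil => rfl
  | cons g rest ih =>
      rw [List.findIdx?_cons] at h
      cases hd : PySem.Set.isdisjoint c g with
      | false => simp [hd] at h
      | true =>
          simp [hd] at h
          have h' : List.findIdx? (fun g => !PySem.Set.isdisjoint c g) rest = none := by
            rw [List.findIdx?_eq_none_iff]
            intro g' hg'
            simp only [Bool.not_eq_false', PySem.Set.isdisjoint_iff]
            exact fun y hy => h g' hg' y hy
          simp [scanMergeA, hd, ih h']

lemma scanMergeA_some (c : List Int) (merged : List (List Int)) (i : Nat)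
    (h : merged.findIdx? (fun g => !PySem.Set.isdisjoint c g) = some i) :
    scanMergeA c merged = some (merged.set i (PySem.Set.union (merged.getD i []) c)) := by
  induction merged generalizing i with
  | nil => simp at h
  | cons g rest ih =>
      rw [List.findIdx?_cons] at h
      cases hd : PySem.Set.isdisjoint c g with
      | false =>
          simp [hd] at h
          subst h
          simp [scanMergeA, hd]
      | true =>
          simp [hd] at h
          cases hfi : List.findIdx? (fun g => !PySem.Set.isdisjoint c g) rest with
          | none => rw [hfi] at h; simp at h
          | some i' =>
              rw [hfi] at h
              simp at h
              subst h
              simp [scanMergeA, hd, ih i' hfi, List.getD]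

lemma findIdx?_congr_pt (p q : List Int → Bool) (l l' : List (List Int))
    (hlen : l.length = l'.length)
    (hpt : ∀ k (hk : k < l.length), p l[k] = q (l'[k]'(hlen ▸ hk))) :
    l.findIdx? p = l'.findIdx? q := by
  induction l generalizing l' with
  | nil => cases l' with
      | nil => rfl
      | cons b t => simp at hlen
  | cons a t ih =>
      cases l' with
      | nil => simp at hlen
      | cons b t' =>
          have h0 := hpt 0 (by simp)
          simp only [List.getElem_cons_zero] at h0
          rw [List.findIdx?_cons, List.findIdx?_cons, h0,
            ih t' (by simpa using hlen)
              (fun k hk => by simpa using hpt (k+1) (by simpa using Nat.succ_lt_succ hk))]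

-- any index containing e is ≥ the first one
lemma mem_first_idx (merged : List (List Int)) (e : Int) (i : Nat)
    (hi : i < merged.length) (he : e ∈ merged[i]) :
    ∃ i0, i0 ≤ i ∧ merged.findIdx? (fun g => decide (e ∈ g)) = some i0 := by
  cases hfi : merged.findIdx? (fun g => decide (e ∈ g)) with
  | none =>
      have := List.findIdx?_eq_none_iff.mp hfi merged[i] (List.getElem_mem hi)
      simp [he] at this
  | some i0 =>
      obtain ⟨hlen0, _, hmin0⟩ := List.findIdx?_eq_some_iff_getElem.mp hfi
      refine ⟨i0, ?_, rfl⟩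
      by_contra hgt
      exact (by simpa [he] using hmin0 i (by omega))

theorem loopAB (rest : List (List Int)) : ∀ (merged : List (List Int)) (loc : PySem.Dict Int Int),
    InvLoc loc merged → loopA rest merged = loopB rest merged loc := by
  induction rest with
  | nil => intro merged loc _; rfl
  | cons c rest ih =>
      intro merged loc hinv
      simp only [loopA, loopB]
      cases hm : PySem.List.min? (hitsB loc c) (fun x => x) with
      | none =>
          have hnil : hitsB loc c = [] := (PySem.List.min?_eq_none_iff (hitsB loc c) (fun x => x)).mp hm
          have hlocc : ∀ e ∈ c, loc.get? e = none := by
            intro e he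
            exact List.filterMap_eq_nil_iff.mp hnil e he
          have hfidxc : ∀ e ∈ c, merged.findIdx? (fun g => decide (e ∈ g)) = none := by
            intro e he
            have h1 := hinv e
            rw [hlocc e he] at h1
            exact (Option.map_eq_none_iff).mp h1.symm
          have hfo : merged.findIdx? (fun g => !PySem.Set.isdisjoint c g) = none := by
            rw [List.findIdx?_eq_none_iff]
            intro g hg
            simp only [Bool.not_eq_eq_eq_not, Bool.not_false, PySem.Set.isdisjoint_iff]
            intro x hx
            have := List.findIdx?_eq_none_iff.mp (hfidxc x hx) g hg
            simpa using this
          rw [scanMergeA_none c merged hfo]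
          apply ih
          intro e
          rw [updLocB_get?]
          by_cases hec : e ∈ c
          · rw [if_pos hec, List.findIdx?_append, hfidxc e hec]
            simp [hec, hlocc e hec, List.findIdx?_cons]
          · rw [if_neg hec, List.findIdx?_append, hinv e]
            cases hfi : merged.findIdx? (fun g => decide (e ∈ g)) with
            | some i => simp
            | none => simp [List.findIdx?_cons, hec]
      | some j =>
          -- the minimum hit is exactly the first overlapping group index i
          have hjmem : j ∈ hitsB loc c := PySem.List.min?_mem hm
          obtain ⟨e0, he0c, hje0⟩ := List.mem_filterMap.mp hjmem
          have h1 := hinv e0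
          rw [hje0] at h1
          obtain ⟨n0, hn0, hjn0⟩ := Option.map_eq_some_iff.mp h1.symm
          obtain ⟨hn0len, he0mem, _⟩ := List.findIdx?_eq_some_iff_getElem.mp hn0
          simp only [decide_eq_true_eq] at he0mem
          -- the overlap scan finds something
          cases hfo : merged.findIdx? (fun g => !PySem.Set.isdisjoint c g) with
          | none =>
              have := List.findIdx?_eq_none_iff.mp hfo merged[n0] (List.getElem_mem hn0len)
              simp only [Bool.not_eq_eq_eq_not, Bool.not_false, PySem.Set.isdisjoint_iff] at this
              exact absurd (this e0 he0c) (by simp [he0mem])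
          | some i =>
              obtain ⟨hilen, hover, hless⟩ := List.findIdx?_eq_some_iff_getElem.mp hfo
              have hdisj : ∀ k (hk : k < i), ∀ y ∈ c, y ∉ merged[k]'(by omega) := by
                intro k hk y hy
                have h2 : PySem.Set.isdisjoint c (merged[k]'(by omega)) = true := by
                  simpa using hless k hk
                exact (PySem.Set.isdisjoint_iff _ _).mp h2 y hy
              -- i ≤ n0 hence i ≤ j
              have hin0 : i ≤ n0 := by
                by_contra hgt
                exact hdisj n0 (by omega) e0 he0c he0mem
              -- (i : Int) ∈ hits
              obtain ⟨e1, he1c, he1mem⟩ : ∃ e1 ∈ c, e1 ∈ merged[i] := by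
                have h2' := hover
                rw [Bool.not_eq_true'] at h2'
                have h2 : ¬ (PySem.Set.isdisjoint c merged[i] = true) := by simp [h2']
                rw [PySem.Set.isdisjoint_iff] at h2
                simp only [not_forall, not_not, exists_prop] at h2
                exact h2
              obtain ⟨i1, hi1le, hi1⟩ := mem_first_idx merged e1 i hilen he1mem
              obtain ⟨hi1len, he1mem1, _⟩ := List.findIdx?_eq_some_iff_getElem.mp hi1
              simp only [decide_eq_true_eq] at he1mem1
              have hi1eq : i1 = i := by
                by_contra hne
                exact hdisj i1 (by omega) e1 he1c he1mem1
              have hihit : (i : Int) ∈ hitsB loc c := by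
                refine List.mem_filterMap.mpr ⟨e1, he1c, ?_⟩
                rw [hinv e1, hi1, hi1eq]
                rfl
              have hji : j = (i : Int) := by
                have hle := PySem.List.min?_isMin hm _ hihit
                have hge : (i : Int) ≤ j := by
                  rw [← hjn0]
                  exact_mod_cast hin0
                omega
              -- both sides update group i and recurse with the updated map
              rw [scanMergeA_some c merged i hfo, hji]
              have hBset :
                  PySem.List.pySetD merged (i : Int)
                      (PySem.Set.union (PySem.List.pyGetD merged (i : Int) []) c) =
                    merged.set i (PySem.Set.union (merged.getD i []) c) := by
                rw [PySem.List.pyGetD_natCast, PySem.List.pySetD_natCast]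
              show loopA rest (merged.set i (PySem.Set.union (merged.getD i []) c)) =
                loopB rest
                  (PySem.List.pySetD merged (i : Int)
                    (PySem.Set.union (PySem.List.pyGetD merged (i : Int) []) c))
                  (updLocB loc c (i : Int))
              rw [hBset]
              apply ih
              -- invariant is preserved by the merge step
              intro e
              rw [updLocB_get?]
              by_cases hec : e ∈ c
              · rw [if_pos hec]
                cases hv : loc.get? e with
                | none =>
                    have hfe : merged.findIdx? (fun g => decide (e ∈ g)) = none := by
                      have h2 := hinv e; rw [hv] at h2
                      exact (Option.map_eq_none_iff).mp h2.symm
                    have hnew : (merged.set i (PySem.Set.union (merged.getD i []) c)).findIdx?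
                        (fun g => decide (e ∈ g)) = some i := by
                      rw [List.findIdx?_eq_some_iff_getElem]
                      refine ⟨by simpa using hilen, ?_, ?_⟩
                      · simp only [List.getElem_set]
                        simp only [List.getD_eq_getElem?_getD, List.getElem?_eq_getElem hilen, Option.getD_some]
                        simp [PySem.Set.mem_union, hec]
                      · intro k hk
                        have hke := List.findIdx?_eq_none_iff.mp hfe
                            (merged[k]'(by omega)) (List.getElem_mem (by omega))
                        simp only [List.getElem_set, if_neg (by omega : ¬ i = k)]
                        simpa using hke
                    rw [hnew]
                    rfl
                | some v =>
                    have h2 := hinv e; rw [hv] at h2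
                    obtain ⟨n, hn, hvn⟩ := Option.map_eq_some_iff.mp h2.symm
                    obtain ⟨hnlen, hemem, hmin⟩ := List.findIdx?_eq_some_iff_getElem.mp hn
                    simp only [decide_eq_true_eq] at hemem
                    have hnew : (merged.set i (PySem.Set.union (merged.getD i []) c)).findIdx?
                        (fun g => decide (e ∈ g)) = some (min n i) := by
                      rw [List.findIdx?_eq_some_iff_getElem]
                      refine ⟨by simp; omega, ?_, ?_⟩
                      · by_cases hle : i ≤ n
                        · have hmi : min n i = i := by omega
                          simp only [hmi, List.getElem_set]
                          simp only [List.getD_eq_getElem?_getD, List.getElem?_eq_getElem hilen, Option.getD_some]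
                          simp [PySem.Set.mem_union, hec]
                        · have hmi : min n i = n := by omega
                          simp only [hmi, List.getElem_set, if_neg (by omega : ¬ i = n)]
                          simpa using hemem

                      · intro k hk
                        have hkn : k < n := by omega
                        have := hmin k hkn
                        simp only [decide_eq_true_eq] at this
                        simp only [List.getElem_set, if_neg (by omega : ¬ i = k)]
                        simpa using this
                    rw [hnew, ← hvn]
                    simp [Nat.cast_min]
              · rw [if_neg hec, hinv e]
                congr 1
                refine findIdx?_congr_pt _ _ _ _ (by simp) ?_
                intro k hk
                by_cases hki : k = i
                · subst hki
                  simp only [List.getElem_set]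
                  simp only [List.getD_eq_getElem?_getD, List.getElem?_eq_getElem hilen, Option.getD_some]
                  simp [PySem.Set.mem_union, hec]
                · simp [Ne.symm hki]

-- ===== VERDICT =====
theorem merge_circuits_spec : Claim_equal_merge_circuits := by
  intro circuits _
  unfold Spec_merge_circuits merge_circuits merge_circuits_alt
  exact loopAB circuits [] PySem.Dict.empty (by intro e; simp [PySem.Dict.get?, PySem.Dict.empty])
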